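-- pv_equiv track=rewrite | github.com/fastyangmh/LeetCode | Python/3858. Minimum Bitwise OR From Grid.py | minimumOR
-- ===== SOURCE A (Python) =====
-- from typing import List
--
-- def minimumOR(grid: List[List[int]]) -> int:
--     ans = 0
--     rows = len(grid)
--
--     for bit in range(17, -1, -1):
--         temp = [[] for _ in range(rows)]
--         possible = True
--
--         for idx in range(rows):
--             for num in grid[idx]:
--                 if num & (1 << bit) == 0:
--                     temp[idx].append(num)
--
--             if not temp[idx]:
--                 possible = False
--                 break
--
--         if not possible:
--             ans |= 1 << bit
--         else:
--             grid = temp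
--
--     return ans
-- ===== SOURCE B (Python) =====
-- from typing import List
--
-- def minimumOR(grid: List[List[int]]) -> int:
--     # Keep the grid read-only; clear_mask collects the bits committed to zero.
--     ans = 0
--     clear_mask = 0
--     for bit in range(17, -1, -1):
--         want = clear_mask | (1 << bit)
--         if all(any(num & want == 0 for num in row) for row in grid):
--             clear_mask = want
--         else:
--             ans |= 1 << bit
--     return ans
-- ===== Notes on version B (the rewrite author's own statement) =====
-- stated objective: alternative
-- what changed: B keeps the grid read-only and maintains one integer clear_mask of bits committed to zero, testing each bit's feasibility with num & (clear_mask | 1<<bit) == 0 over the original rows, instead of A's per-bit rebuilding of shrinking candidate lists.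
import Mathlib
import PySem

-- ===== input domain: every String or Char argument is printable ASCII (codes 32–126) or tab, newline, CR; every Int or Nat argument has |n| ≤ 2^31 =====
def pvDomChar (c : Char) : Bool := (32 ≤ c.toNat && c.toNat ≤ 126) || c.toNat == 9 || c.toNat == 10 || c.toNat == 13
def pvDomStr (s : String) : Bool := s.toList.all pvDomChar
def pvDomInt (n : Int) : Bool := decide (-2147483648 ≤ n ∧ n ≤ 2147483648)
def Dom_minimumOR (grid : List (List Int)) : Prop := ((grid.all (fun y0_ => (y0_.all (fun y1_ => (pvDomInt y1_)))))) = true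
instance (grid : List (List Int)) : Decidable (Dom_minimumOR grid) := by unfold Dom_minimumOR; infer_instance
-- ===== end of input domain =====

-- B replaces A's per-bit rebuilding of shrinking candidate lists by a single integer
-- mask of committed-to-zero bits over the read-only grid (objective: alternative).

-- ===== PORT A =====
-- inner 'for num in grid[idx]: if num & (1 << bit) == 0: temp[idx].append(num)'
def pvFilterRow (pk : Int) (row : List Int) : List Int :=
  row.foldl (fun acc num => if PySem.Int.band num pk == 0 then acc ++ [num] else acc) []

-- the 'for idx in range(rows)' loop with its 'break': none = 'possible = False'
def pvBuildTemp (pk : Int) : List (List Int) → Option (List (List Int))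
  | [] => some []
  | r :: rs =>
    let t := pvFilterRow pk r
    if t.isEmpty then none
    else match pvBuildTemp pk rs with
         | none => none
         | some ts => some (t :: ts)

def pvStepA (s : Int × List (List Int)) (bit : Int) : Int × List (List Int) :=
  match pvBuildTemp ((1 : Int) <<< bit.toNat) s.2 with
  | none => (PySem.Int.bor s.1 ((1 : Int) <<< bit.toNat), s.2)
  | some t => (s.1, t)

def minimumOR (grid : List (List Int)) : Int :=
  ((PySem.List.pyRange 17 (-1) (-1)).foldl pvStepA ((0 : Int), grid)).1

-- ===== PORT B =====
def pvStepB (grid : List (List Int)) (s : Int × Int) (bit : Int) : Int × Int :=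
  let want := PySem.Int.bor s.2 ((1 : Int) <<< bit.toNat)
  if grid.all (fun row => row.any (fun num => PySem.Int.band num want == 0))
  then (s.1, want)
  else (PySem.Int.bor s.1 ((1 : Int) <<< bit.toNat), s.2)

def minimumOR_alt (grid : List (List Int)) : Int :=
  ((PySem.List.pyRange 17 (-1) (-1)).foldl (pvStepB grid) ((0 : Int), (0 : Int))).1

-- ===== PRECONDITION & SPEC =====
def Spec_minimumOR (grid : List (List Int)) (out : Int) : Prop := out = minimumOR_alt grid
instance (grid : List (List Int)) (out : Int) : Decidable (Spec_minimumOR grid out) := by unfold Spec_minimumOR; infer_instance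

-- ===== CLAIM (what is proved, stated in full; the proofs are below) =====
def Claim_equal_minimumOR : Prop := ∀ (grid : List (List Int)), Dom_minimumOR grid → Spec_minimumOR grid (minimumOR grid)

-- ===== LEMMAS AND PROOFS =====

-- Nat: a &&& (m ||| n) = 0 splits
lemma pv_nat_and_or_zero (a m n : Nat) :
    a &&& (m ||| n) = 0 ↔ (a &&& m = 0 ∧ a &&& n = 0) := by
  constructor
  · intro h
    constructor <;>
    · apply Nat.eq_of_testBit_eq
      intro i
      have h' := congrArg (fun t => Nat.testBit t i) h
      simp [Nat.testBit_and, Nat.testBit_or, Nat.zero_testBit] at h' ⊢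
      tauto
  · rintro ⟨h1, h2⟩
    apply Nat.eq_of_testBit_eq
    intro i
    have h1' := congrArg (fun t => Nat.testBit t i) h1
    have h2' := congrArg (fun t => Nat.testBit t i) h2
    simp [Nat.testBit_and, Nat.testBit_or, Nat.zero_testBit] at h1' h2' ⊢
    tauto

-- Nat: (m ||| n) &&& c = m ||| n splits
lemma pv_nat_or_and_self (m n c : Nat) :
    (m ||| n) &&& c = m ||| n ↔ (m &&& c = m ∧ n &&& c = n) := by
  constructor
  · intro h
    constructor <;>
    · apply Nat.eq_of_testBit_eq
      intro i
      have h' := congrArg (fun t => Nat.testBit t i) h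
      simp [Nat.testBit_and, Nat.testBit_or] at h' ⊢
      rcases Bool.eq_false_or_eq_true (Nat.testBit c i) with hc | hc <;>
        simp [hc] at h' ⊢
      tauto
  · rintro ⟨h1, h2⟩
    apply Nat.eq_of_testBit_eq
    intro i
    have h1' := congrArg (fun t => Nat.testBit t i) h1
    have h2' := congrArg (fun t => Nat.testBit t i) h2
    simp [Nat.testBit_and, Nat.testBit_or] at h1' h2' ⊢
    rcases Bool.eq_false_or_eq_true (Nat.testBit c i) with hc | hc <;>
      simp [hc] at h1' h2' ⊢
    tauto

lemma pv_band_cast_eq_zero (x : Int) (k : Nat) :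
    PySem.Int.band x (k : Int) = 0 ↔
      (if 0 ≤ x then x.toNat &&& k = 0 else k &&& (-x - 1).toNat = k) := by
  unfold PySem.Int.band
  have hk : (0 : Int) ≤ (k : Int) := Int.natCast_nonneg k
  by_cases hx : 0 ≤ x
  · simp [hx, hk]
  · have hle : k &&& (-x - 1).toNat ≤ k := Nat.and_le_left
    simp only [hx, if_false, hk, if_true, Int.toNat_natCast]
    constructor
    · intro h
      have : k - (k &&& (-x - 1).toNat) = 0 := by exact_mod_cast h
      omega
    · intro h
      have : k - (k &&& (-x - 1).toNat) = 0 := by omega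
      exact_mod_cast this

-- splitting 'num & (mask | p) == 0' into the two tests
lemma pv_band_or_split (x : Int) (m n : Nat) :
    PySem.Int.band x ((m ||| n : Nat) : Int) = 0 ↔
      (PySem.Int.band x (m : Int) = 0 ∧ PySem.Int.band x (n : Int) = 0) := by
  rw [pv_band_cast_eq_zero, pv_band_cast_eq_zero, pv_band_cast_eq_zero]
  by_cases hx : 0 ≤ x
  · simp only [hx, if_true]
    exact pv_nat_and_or_zero _ _ _
  · simp only [hx, if_false]
    exact pv_nat_or_and_self _ _ _

lemma pv_one_shiftLeft_cast (b : Nat) : (1 : Int) <<< b = ((1 <<< b : Nat) : Int) := by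
  exact Int.mem_toNat?.mp rfl

lemma pvFilterRow_eq (pk : Int) (row : List Int) :
    pvFilterRow pk row = row.filter (fun n => PySem.Int.band n pk == 0) := by
  unfold pvFilterRow
  simpa using PySem.List.foldl_append_if (fun n => PySem.Int.band n pk == 0) id row []

lemma pvBuildTemp_eq (pk : Int) (g : List (List Int)) :
    pvBuildTemp pk g =
      if g.all (fun r => !(pvFilterRow pk r).isEmpty)
      then some (g.map (pvFilterRow pk)) else none := by
  induction g with
  | nil => simp [pvBuildTemp]
  | cons r rs ih =>
    simp only [pvBuildTemp, ih, List.all_cons, List.map_cons]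
    by_cases h1 : (pvFilterRow pk r).isEmpty <;>
      by_cases h2 : rs.all (fun r => !(pvFilterRow pk r).isEmpty) <;>
        simp [h1, h2]

def pvMaskFilter (M : Nat) (row : List Int) : List Int :=
  row.filter (fun n => PySem.Int.band n (M : Int) == 0)

lemma pvMaskFilter_step (M b : Nat) (row : List Int) :
    pvFilterRow ((1 : Int) <<< b) (pvMaskFilter M row)
      = pvMaskFilter (M ||| (1 <<< b)) row := by
  rw [pvFilterRow_eq]
  unfold pvMaskFilter
  rw [List.filter_filter]
  apply List.filter_congr
  intro n _
  rw [pv_one_shiftLeft_cast]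
  apply Bool.eq_iff_iff.mpr
  simp only [Bool.and_eq_true, beq_iff_eq]
  rw [and_comm]
  exact (pv_band_or_split n M (1 <<< b)).symm

lemma pv_cond_eq (grid : List (List Int)) (M b : Nat) :
    ((grid.map (pvMaskFilter M)).all fun r => !(pvFilterRow ((1 : Int) <<< b) r).isEmpty)
      = grid.all (fun row => row.any
          (fun num => PySem.Int.band num (PySem.Int.bor (M : Int) ((1 : Int) <<< b)) == 0)) := by
  rw [List.all_map]
  congr 1
  funext row
  simp only [Function.comp, pvMaskFilter_step]
  rw [pv_one_shiftLeft_cast, PySem.Int.bor_natCast]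
  unfold pvMaskFilter
  apply Bool.eq_iff_iff.mpr
  simp [List.filter_eq_nil_iff, List.any_eq_true]

lemma pv_loop_inv (grid : List (List Int)) (bits : List Int) (ans : Int) (M : Nat) :
    (bits.foldl pvStepA (ans, grid.map (pvMaskFilter M))).1
      = (bits.foldl (pvStepB grid) (ans, (M : Int))).1 := by
  induction bits generalizing ans M with
  | nil => rfl
  | cons b rest ih =>
    simp only [List.foldl_cons]
    have hsA : pvStepA (ans, grid.map (pvMaskFilter M)) b
        = (if grid.all (fun row => row.any
              (fun num => PySem.Int.band num (PySem.Int.bor (M : Int) ((1 : Int) <<< b.toNat)) == 0))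
           then (ans, grid.map (pvMaskFilter (M ||| (1 <<< b.toNat))))
           else (PySem.Int.bor ans ((1 : Int) <<< b.toNat), grid.map (pvMaskFilter M))) := by
      unfold pvStepA
      rw [pvBuildTemp_eq, pv_cond_eq grid M b.toNat]
      by_cases hc : grid.all (fun row => row.any
          (fun num => PySem.Int.band num (PySem.Int.bor (M : Int) ((1 : Int) <<< b.toNat)) == 0))
      · simp only [hc, if_true]
        rw [List.map_map]
        have : pvFilterRow ((1 : Int) <<< b.toNat) ∘ pvMaskFilter M
            = pvMaskFilter (M ||| (1 <<< b.toNat)) :=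
          funext fun row => pvMaskFilter_step M b.toNat row
        simp [this]
      · simp only [hc]
        rfl
    have hsB : pvStepB grid (ans, (M : Int)) b
        = (if grid.all (fun row => row.any
              (fun num => PySem.Int.band num (PySem.Int.bor (M : Int) ((1 : Int) <<< b.toNat)) == 0))
           then (ans, ((M ||| (1 <<< b.toNat) : Nat) : Int))
           else (PySem.Int.bor ans ((1 : Int) <<< b.toNat), (M : Int))) := by
      unfold pvStepB
      rw [show PySem.Int.bor (M : Int) ((1 : Int) <<< b.toNat)
            = ((M ||| (1 <<< b.toNat) : Nat) : Int) by
          rw [pv_one_shiftLeft_cast, PySem.Int.bor_natCast]]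
    rw [hsA, hsB]
    by_cases hc : grid.all (fun row => row.any
        (fun num => PySem.Int.band num (PySem.Int.bor (M : Int) ((1 : Int) <<< b.toNat)) == 0))
    · simp only [hc, if_true]
      apply ih
    · simp only [hc]
      apply ih

lemma pvMaskFilter_zero (row : List Int) : pvMaskFilter 0 row = row := by
  unfold pvMaskFilter
  simp [PySem.Int.band_zero]

-- ===== VERDICT (by name: the statement is the Claim_ definition above) =====
theorem minimumOR_spec : Claim_equal_minimumOR := by
  intro grid _
  unfold Spec_minimumOR minimumOR minimumOR_alt
  have h := pv_loop_inv grid (PySem.List.pyRange 17 (-1) (-1)) 0 0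
  have hg : pvMaskFilter 0 = id := funext fun r => pvMaskFilter_zero r
  rw [hg, List.map_id] at h
  simp only [Nat.cast_zero] at h
  exact h
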